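-- pv_equiv track=rewrite | github.com/bynkook/assyplan | src/python/step_table.py | _build_member_to_element_mapping
-- ===== SOURCE A (Python) =====
-- from typing import Any, Dict, List, Set, Tuple
--
-- def _build_member_to_element_mapping(
--     elements: List[Tuple[int, int, int, str]],
-- ) -> Dict[str, int]:
--     """Build mapping from member ID (string) to element ID (int).
--
--     Assumes elements are indexed sequentially starting from 1,
--     and member IDs follow alphabetical ordering that maps to
--     element indices.
--
--     Args:
--         elements: List of (element_id, node_i_id, node_j_id, member_type) tuples.
--
--     Returns:
--         Dictionary mapping member_id to element_id.
--     """
--     # Sort elements by element_id to ensure consistent ordering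
--     sorted_elements = sorted(elements, key=lambda e: e[0])
--
--     # Generate member IDs: A, B, C, ... AA, AB, ...
--     def get_member_id(idx: int) -> str:
--         """Convert index to member ID (A=0, B=1, ..., Z=25, AA=26, etc)."""
--         result = ""
--         idx += 1
--         while idx > 0:
--             idx -= 1
--             result = chr(ord("A") + (idx % 26)) + result
--             idx //= 26
--         return result
--
--     mapping: Dict[str, int] = {}
--     for idx, element in enumerate(sorted_elements):
--         element_id = element[0]
--         member_id = get_member_id(idx)
--         mapping[member_id] = element_id
--
--     return mapping
-- ===== SOURCE B (Python) =====
-- from typing import Dict, List, Tuple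
--
--
-- def _build_member_to_element_mapping(
--     elements: List[Tuple[int, int, int, str]],
-- ) -> Dict[str, int]:
--     """Map bijective base-26 member IDs (A, B, ..., Z, AA, ...) to element IDs.
--
--     Instead of converting each index to a label by repeated division, walk the
--     label sequence with an odometer-style successor: increment the last letter,
--     carrying Z -> A leftwards, prepending 'A' on overflow.
--     """
--     sorted_elements = sorted(elements, key=lambda e: e[0])
--
--     def _next_label(label: str) -> str:
--         chars = list(label)
--         i = len(chars) - 1
--         while i >= 0 and chars[i] == "Z":
--             chars[i] = "A"
--             i -= 1
--         if i < 0: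
--             return "A" + "".join(chars)
--         chars[i] = chr(ord(chars[i]) + 1)
--         return "".join(chars)
--
--     mapping: Dict[str, int] = {}
--     label = "A"
--     for element in sorted_elements:
--         mapping[label] = element[0]
--         label = _next_label(label)
--     return mapping
-- ===== Notes on version B (the rewrite author's own statement) =====
-- stated objective: alternative
-- what changed: Replaces the per-index repeated-division conversion to bijective base-26 with an odometer-style label successor carried along the loop (increment last letter, carry Z->A, prepend A on overflow); the dict is built by zipping this label stream against the sorted elements.
import Mathlib
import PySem

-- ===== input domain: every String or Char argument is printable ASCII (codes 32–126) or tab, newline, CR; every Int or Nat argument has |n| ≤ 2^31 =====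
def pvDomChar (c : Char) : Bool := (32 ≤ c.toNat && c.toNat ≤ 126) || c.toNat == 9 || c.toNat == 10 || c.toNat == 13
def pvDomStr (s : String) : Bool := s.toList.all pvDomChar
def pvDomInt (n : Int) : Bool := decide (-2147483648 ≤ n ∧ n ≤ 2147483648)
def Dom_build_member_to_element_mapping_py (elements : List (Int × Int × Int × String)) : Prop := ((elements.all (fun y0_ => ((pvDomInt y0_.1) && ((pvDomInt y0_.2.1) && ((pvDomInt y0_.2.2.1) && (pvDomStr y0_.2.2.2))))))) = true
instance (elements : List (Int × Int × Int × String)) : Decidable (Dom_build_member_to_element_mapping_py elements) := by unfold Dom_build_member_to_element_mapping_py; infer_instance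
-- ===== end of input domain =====

-- B replaces A's per-index repeated-division base-26 conversion with an odometer-style
-- label successor carried along the loop (alternative decomposition, same cost).

-- ===== PORT A =====
-- the while-loop of get_member_id: while idx > 0: idx -= 1; result = chr(65 + idx%26) + result; idx //= 26
def gmLoop (idx : Int) (result : List Char) : List Char :=
  if h : idx > 0 then
    gmLoop (PySem.Int.floordiv (idx - 1) 26)
      (Char.ofNat ((65 + PySem.Int.mod (idx - 1) 26).toNat) :: result)
  else result
termination_by idx.toNat
decreasing_by
  rw [PySem.Int.floordiv_eq_ediv_of_pos (by norm_num : (0:Int) < 26)]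
  have h2 : (idx - 1) / 26 ≤ idx - 1 := Int.ediv_le_self 26 (by omega)
  omega

def get_member_id (idx : Int) : String := String.ofList (gmLoop (idx + 1) [])

def build_member_to_element_mapping_py (elements : List (Int × Int × Int × String)) : List (String × Int) :=
  let sorted_elements := PySem.List.sorted elements (fun e => e.1)
  let mapping := (PySem.List.enumerate sorted_elements).foldl
      (fun m ie => PySem.Dict.insert m (get_member_id ie.1) ie.2.1) PySem.Dict.empty
  mapping.items

-- ===== PORT B =====
-- _next_label's right-to-left carry scan, as structural recursion on the reversed letters
def incRev : List Char → List Char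
  | [] => ['A']
  | c :: cs => if c = 'Z' then 'A' :: incRev cs else Char.ofNat (c.toNat + 1) :: cs

def nextLabel (s : String) : String := String.ofList (incRev s.toList.reverse).reverse

def build_member_to_element_mapping_py_alt (elements : List (Int × Int × Int × String)) : List (String × Int) :=
  let sorted_elements := PySem.List.sorted elements (fun e => e.1)
  (sorted_elements.foldl
      (fun (st : PySem.Dict String Int × String) e =>
        (PySem.Dict.insert st.1 st.2 e.1, nextLabel st.2))
      (PySem.Dict.empty, "A")).1.items

-- ===== PRECONDITION & SPEC =====
def Spec_build_member_to_element_mapping_py (elements : List (Int × Int × Int × String)) (out : List (String × Int)) : Prop := out = build_member_to_element_mapping_py_alt elements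
instance (elements : List (Int × Int × Int × String)) (out : List (String × Int)) : Decidable (Spec_build_member_to_element_mapping_py elements out) := by unfold Spec_build_member_to_element_mapping_py; infer_instance

-- ===== CLAIM (what is proved, stated in full; the proofs are below) =====
def Claim_equal_build_member_to_element_mapping_py : Prop := ∀ (elements : List (Int × Int × Int × String)), Dom_build_member_to_element_mapping_py elements → Spec_build_member_to_element_mapping_py elements (build_member_to_element_mapping_py elements)

-- ===== LEMMAS AND PROOFS =====
-- bijective base-26 digits of n, most significant first (A's label for index n-1)
def repN : Nat → List Char
  | 0 => []
  | n + 1 => repN (n / 26) ++ [Char.ofNat (65 + n % 26)]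
decreasing_by
  have := Nat.div_le_self n 26; omega

theorem charToNat (n : Nat) (h : n < 55296) : (Char.ofNat n).toNat = n := by
  have hv : n.isValidChar := Or.inl h
  simp [Char.ofNat, hv, Char.ofNatAux, Char.toNat]

theorem gmLoop_eq (n : Nat) : ∀ res : List Char, gmLoop (n : Int) res = repN n ++ res := by
  induction n using Nat.strong_induction_on with
  | _ n ih =>
    intro res
    match n with
    | 0 => rw [gmLoop]; simp [repN]
    | m + 1 =>
      rw [gmLoop]
      have hpos : ((m + 1 : Nat) : Int) > 0 := by positivity
      simp only [hpos, dite_true]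
      have hsub : ((m + 1 : Nat) : Int) - 1 = (m : Int) := by push_cast; ring
      rw [hsub]
      have hf : PySem.Int.floordiv (m : Int) 26 = ((m / 26 : Nat) : Int) := by
        exact_mod_cast PySem.Int.floordiv_natCast m 26
      have hm : PySem.Int.mod (m : Int) 26 = ((m % 26 : Nat) : Int) := by
        exact_mod_cast PySem.Int.mod_natCast m 26
      rw [hf, hm]
      have ht : ((65 : Int) + ((m % 26 : Nat) : Int)).toNat = 65 + m % 26 := by omega
      rw [ht, ih (m / 26) (by omega)]
      have e1 : repN (m + 1) = repN (m / 26) ++ [Char.ofNat (65 + m % 26)] := by simp [repN]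
      rw [e1, List.append_assoc]
      simp

theorem get_member_id_eq (n : Nat) : get_member_id (n : Int) = String.ofList (repN (n + 1)) := by
  unfold get_member_id
  have h : (n : Int) + 1 = ((n + 1 : Nat) : Int) := by push_cast; ring
  rw [h, gmLoop_eq, List.append_nil]

theorem incRev_rep (n : Nat) : incRev (repN n).reverse = (repN (n + 1)).reverse := by
  induction n using Nat.strong_induction_on with
  | _ n ih =>
    match n with
    | 0 => simp [repN, incRev]
    | m + 1 =>
      have e1 : repN (m + 1) = repN (m / 26) ++ [Char.ofNat (65 + m % 26)] := by simp [repN]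
      have e2 : repN (m + 2) = repN ((m + 1) / 26) ++ [Char.ofNat (65 + (m + 1) % 26)] := by
        simp [repN]
      have hlt : m % 26 < 26 := Nat.mod_lt _ (by omega)
      by_cases hk : m % 26 = 25
      · have hz : Char.ofNat (65 + m % 26) = 'Z' := by rw [hk]
        have h1 : (m + 1) % 26 = 0 := by omega
        have h2 : (m + 1) / 26 = m / 26 + 1 := by omega
        rw [e1, hz, e2, h1, h2]
        simp only [List.reverse_append, List.reverse_cons, List.reverse_nil, List.nil_append,
          List.singleton_append, incRev]
        rw [if_true, ih (m / 26) (by omega)]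
      · have hnz : Char.ofNat (65 + m % 26) ≠ 'Z' := by
          intro he
          have h90 : ('Z' : Char) = Char.ofNat 90 := by decide
          rw [h90] at he
          have := congrArg Char.toNat he
          rw [charToNat _ (by omega), charToNat _ (by omega)] at this
          omega
        have h1 : (m + 1) % 26 = m % 26 + 1 := by omega
        have h2 : (m + 1) / 26 = m / 26 := by omega
        rw [e1, e2, h1, h2]
        simp only [List.reverse_append, List.reverse_cons, List.reverse_nil, List.nil_append,
          List.singleton_append, incRev]
        rw [if_neg hnz]
        congr 1
        have hc : 65 + m % 26 + 1 = 65 + (m % 26 + 1) := by omega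
        rw [charToNat _ (by omega), hc]

theorem nextLabel_rep (n : Nat) :
    nextLabel (String.ofList (repN n)) = String.ofList (repN (n + 1)) := by
  unfold nextLabel
  have h : (String.ofList (repN n)).toList = repN n := by simp
  rw [h, incRev_rep, List.reverse_reverse]

theorem fold_eq (l : List (Int × Int × Int × String)) : ∀ (i : Nat) (d : PySem.Dict String Int),
    (PySem.List.enumerate l (i : Int)).foldl
        (fun m ie => PySem.Dict.insert m (get_member_id ie.1) ie.2.1) d
      = (l.foldl
          (fun (st : PySem.Dict String Int × String) e =>
            (PySem.Dict.insert st.1 st.2 e.1, nextLabel st.2))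
          (d, String.ofList (repN (i + 1)))).1 := by
  induction l with
  | nil => intro i d; simp [PySem.List.enumerate_nil]
  | cons x xs ih =>
    intro i d
    rw [PySem.List.enumerate_cons]
    simp only [List.foldl_cons]
    rw [get_member_id_eq i, nextLabel_rep]
    have h : (i : Int) + 1 = ((i + 1 : Nat) : Int) := by push_cast; ring
    rw [h, ih (i + 1)]

-- ===== VERDICT (by name: the statement is the Claim_ definition above) =====
theorem build_member_to_element_mapping_py_spec : Claim_equal_build_member_to_element_mapping_py := by
  intro elements _
  unfold Spec_build_member_to_element_mapping_py
  simp only [build_member_to_element_mapping_py, build_member_to_element_mapping_py_alt]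
  have hA : ("A" : String) = String.ofList (repN 1) := by
    have h1 : repN 1 = ['A'] := by simp [repN]
    rw [h1]
  rw [hA]
  have hf := fold_eq (PySem.List.sorted elements (fun e => e.1)) 0 PySem.Dict.empty
  simp only [Nat.cast_zero, Nat.zero_add] at hf
  rw [hf]
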